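-- pv_equiv track=rewrite | github.com/Yawn-Sean/Daily_CF_Problems | daily_problems/2024/11/1122/personal_submission/cf215e_crzhou.py | solve
-- ===== SOURCE A (Python) =====
-- def cal(len, j, o, a):
--     c = 0
--     b = 1
--     for i in range(1, j + 1):
--         c += (a[len - i] << (j - i))
--     b = c
--     for i in range(1, len // j):
--         b <<= j
--         b += c
--     sum_val = 1 << (j - 1)
--     return c - sum_val + (b <= o)
--
-- def solve(w):
--     a = []
--     len_ = 0
--     ww = w
--     ans = 0
--     while w:
--         a.append(w % 2)
--         w //= 2
--         len_ += 1
--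
--     for i in range(2, len_ + 1):
--         dp = [0] * 100
--         for j in range(1, i // 2 + 1):
--             if i % j:
--                 continue
--             if i < len_:
--                 dp[j] += (1 << (j - 1))
--             else:
--                 dp[j] += cal(len_, j, ww, a)
--             for k in range(1, j):
--                 if j % k == 0:
--                     dp[j] -= dp[k]
--             ans += dp[j]
--     return ans
-- ===== SOURCE B (Python) =====
-- def cal(len, j, o, a):
--     c = 0
--     b = 1
--     for i in range(1, j + 1):
--         c += (a[len - i] << (j - i))
--     b = c
--     for i in range(1, len // j):
--         b <<= j
--         b += c
--     sum_val = 1 << (j - 1)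
--     return c - sum_val + (b <= o)
--
-- def mu_table(n):
--     # Mobius function values mu[0..n], built from the defining identity
--     # sum_{d | m} mu(d) = [m == 1].
--     mu = [0] * (n + 1)
--     for m in range(1, n + 1):
--         s = 0
--         for d in range(1, m):
--             if m % d == 0:
--                 s += mu[d]
--         mu[m] = (1 if m == 1 else 0) - s
--     return mu
--
-- def solve(w):
--     a = []
--     len_ = 0
--     ww = w
--     ans = 0
--     while w:
--         a.append(w % 2)
--         w //= 2
--         len_ += 1
--     mu = mu_table(len_ // 2)
--     for i in range(2, len_ + 1):
--         for j in range(1, i // 2 + 1):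
--             if i % j:
--                 continue
--             for d in range(1, j + 1):
--                 if j % d == 0:
--                     base = (1 << (d - 1)) if i < len_ else cal(len_, d, ww, a)
--                     ans += mu[j // d] * base
--     return ans
-- ===== Notes on version B (the rewrite author's own statement) =====
-- stated objective: alternative
-- what changed: Replaces A's per-length dp array and its order-dependent subtraction recurrence (dp[j] -= dp[k] over processed divisors) by a direct Moebius-inversion sum over the divisors of each period, with the Moebius values precomputed once in a table.
import Mathlib
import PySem

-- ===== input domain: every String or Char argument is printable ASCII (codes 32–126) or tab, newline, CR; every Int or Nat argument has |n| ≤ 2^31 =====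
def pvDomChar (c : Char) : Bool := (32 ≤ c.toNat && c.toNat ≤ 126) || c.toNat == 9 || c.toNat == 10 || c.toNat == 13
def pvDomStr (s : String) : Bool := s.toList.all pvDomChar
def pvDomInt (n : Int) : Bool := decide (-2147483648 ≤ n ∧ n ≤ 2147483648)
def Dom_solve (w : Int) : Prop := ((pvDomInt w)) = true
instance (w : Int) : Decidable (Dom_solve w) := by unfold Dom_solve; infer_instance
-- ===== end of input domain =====

-- B replaces A's per-length dp array and its order-dependent subtraction recurrence by a
-- direct Möbius-inversion sum over divisors with a precomputed Möbius table (objective: alternative).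


-- ===== PORT A =====
-- helper `cal` of Source A (Source B carries the identical text; both ports call this one def).
-- a[len-i] is ported with pyGetD and 'x << n' as 'x * 2 ^ n.toNat' (index and shift are
-- in range / nonnegative at every call reached from solve).
def cal (len j o : Int) (a : List Int) : Int :=
  let c := (PySem.List.pyRange 1 (j + 1) 1).foldl
      (fun c i => c + PySem.List.pyGetD a (len - i) 0 * 2 ^ (j - i).toNat) 0
  let b := (PySem.List.pyRange 1 (PySem.Int.floordiv len j) 1).foldl
      (fun b _ => b * 2 ^ j.toNat + c) c
  let sum_val : Int := 2 ^ (j - 1).toNat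
  c - sum_val + (if b ≤ o then 1 else 0)

-- the 'while w:' bit-extraction loop (identical text in Source A and Source B).  Python's loop
-- tests w ≠ 0 and never terminates for w < 0 (w // 2 is eventually stuck at -1); this
-- port stops on w ≤ 0 — exact for w ≥ 0; w < 0 is excluded by Pre_solve.
def bitLoop (w : Int) (a : List Int) (len_ : Int) : List Int × Int :=
  if 0 < w then
    bitLoop (PySem.Int.floordiv w 2) (a ++ [PySem.Int.mod w 2]) (len_ + 1)
  else (a, len_)
termination_by w.toNat
decreasing_by
  rename_i h
  rw [PySem.Int.floordiv_eq_ediv_of_pos (by omega)]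
  omega

-- body of A's inner 'for k in range(1, j)' loop
def dpKStep (j : Int) (dp : List Int) (k : Int) : List Int :=
  if PySem.Int.mod j k = 0 then
    PySem.List.pySetD dp j (PySem.List.pyGetD dp j 0 - PySem.List.pyGetD dp k 0)
  else dp

-- body of A's 'for j in range(1, i // 2 + 1)' loop, state = (ans, dp)
def dpJStep (len_ ww : Int) (a : List Int) (i : Int) (st : Int × List Int) (j : Int) :
    Int × List Int :=
  if PySem.Int.mod i j ≠ 0 then st
  else
    let dp := PySem.List.pySetD st.2 j (PySem.List.pyGetD st.2 j 0 +
      (if i < len_ then 2 ^ (j - 1).toNat else cal len_ j ww a))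
    let dp := (PySem.List.pyRange 1 j 1).foldl (dpKStep j) dp
    (st.1 + PySem.List.pyGetD dp j 0, dp)

def solve (w : Int) : Int :=
  let p := bitLoop w [] 0
  (PySem.List.pyRange 2 (p.2 + 1) 1).foldl
    (fun ans i =>
      ((PySem.List.pyRange 1 (PySem.Int.floordiv i 2 + 1) 1).foldl
        (dpJStep p.2 w p.1 i) (ans, List.replicate 100 0)).1)
    0

-- ===== PORT B =====
-- Source B's mu_table: Möbius values mu[0..n] from the identity  sum_{d | m} mu(d) = [m = 1]
def muTable (n : Int) : List Int :=
  (PySem.List.pyRange 1 (n + 1) 1).foldl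
    (fun mu m =>
      let s := (PySem.List.pyRange 1 m 1).foldl
        (fun s d => if PySem.Int.mod m d = 0 then s + PySem.List.pyGetD mu d 0 else s) 0
      PySem.List.pySetD mu m ((if m = 1 then 1 else 0) - s))
    (List.replicate (n + 1).toNat 0)

-- body of B's innermost 'for d in range(1, j + 1)' loop
def altDStep (len_ ww : Int) (a mu : List Int) (i j : Int) (ans : Int) (d : Int) : Int :=
  if PySem.Int.mod j d = 0 then
    ans + PySem.List.pyGetD mu (PySem.Int.floordiv j d) 0 *
      (if i < len_ then 2 ^ (d - 1).toNat else cal len_ d ww a)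
  else ans

-- body of B's 'for j in range(1, i // 2 + 1)' loop
def altJStep (len_ ww : Int) (a mu : List Int) (i : Int) (ans : Int) (j : Int) : Int :=
  if PySem.Int.mod i j ≠ 0 then ans
  else (PySem.List.pyRange 1 (j + 1) 1).foldl (altDStep len_ ww a mu i j) ans

def solve_alt (w : Int) : Int :=
  let p := bitLoop w [] 0
  let mu := muTable (PySem.Int.floordiv p.2 2)
  (PySem.List.pyRange 2 (p.2 + 1) 1).foldl
    (fun ans i =>
      (PySem.List.pyRange 1 (PySem.Int.floordiv i 2 + 1) 1).foldl
        (altJStep p.2 w p.1 mu i) ans)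
    0

-- ===== PRECONDITION & SPEC =====
-- Pre_ excludes negative w, on which A's bit-extraction 'while w:' loop never terminates
-- (w // 2 is eventually stuck at -1), so A returns no value there.
def Pre_solve (w : Int) : Prop := 0 ≤ w
instance (w : Int) : Decidable (Pre_solve w) := by unfold Pre_solve; infer_instance
def pvWitness_solve : Int := 239

def Spec_solve (w : Int) (out : Int) : Prop := out = solve_alt w
instance (w : Int) (out : Int) : Decidable (Spec_solve w out) := by unfold Spec_solve; infer_instance

-- ===== CLAIM (what is proved, stated in full; the proofs are below) =====
def Claim_equal_solve : Prop := ∀ (w : Int), Dom_solve w → Pre_solve w → Spec_solve w (solve w)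

-- ===== LEMMAS AND PROOFS =====

-- the per-length base value of both programs, as a function of the (Nat) period d
def baseG (len_ ww : Int) (a : List Int) (i : Int) (d : ℕ) : Int :=
  if i < len_ then 2 ^ (d - 1) else cal len_ (d : Int) ww a

-- baseG as an arithmetic function, and F = μ * G (count of words of exact period d)
def baseAF (len_ ww : Int) (a : List Int) (i : Int) : ArithmeticFunction ℤ :=
  ⟨fun d => if d = 0 then 0 else baseG len_ ww a i d, by simp⟩

def exactF (len_ ww : Int) (a : List Int) (i : Int) : ArithmeticFunction ℤ :=
  ArithmeticFunction.moebius * baseAF len_ ww a i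

lemma sum_divisors_moebius (m : ℕ) :
    ∑ d ∈ m.divisors, (ArithmeticFunction.moebius d : ℤ) = if m = 1 then 1 else 0 := by
  have h : (ArithmeticFunction.moebius * (ArithmeticFunction.zeta : ArithmeticFunction ℕ)) m
      = (1 : ArithmeticFunction ℤ) m := by rw [ArithmeticFunction.moebius_mul_coe_zeta]
  rw [ArithmeticFunction.coe_mul_zeta_apply, ArithmeticFunction.one_apply] at h
  exact h

lemma exactF_recurrence (len_ ww : Int) (a : List Int) (i : Int) (j : ℕ) (hj : j ≠ 0) :
    exactF len_ ww a i j =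
      baseG len_ ww a i j - ∑ k ∈ j.properDivisors, exactF len_ ww a i k := by
  have h1 : ((ArithmeticFunction.zeta : ArithmeticFunction ℕ) * exactF len_ ww a i) j
      = baseAF len_ ww a i j := by
    rw [exactF, ← mul_assoc, ArithmeticFunction.coe_zeta_mul_moebius, one_mul]
  rw [ArithmeticFunction.coe_zeta_mul_apply] at h1
  rw [← Nat.cons_self_properDivisors hj, Finset.sum_cons] at h1
  have h2 : baseAF len_ ww a i j = baseG len_ ww a i j := by simp [baseAF, hj]
  rw [h2] at h1
  omega

lemma exactF_moebius_sum (len_ ww : Int) (a : List Int) (i : Int) (j : ℕ) :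
    exactF len_ ww a i j =
      ∑ d ∈ j.divisors, (ArithmeticFunction.moebius (j / d) : ℤ) * baseG len_ ww a i d := by
  rw [exactF, ArithmeticFunction.mul_apply,
    Nat.sum_divisorsAntidiagonal'
      (f := fun x y => (ArithmeticFunction.moebius x : ℤ) * baseAF len_ ww a i y)]
  refine Finset.sum_congr rfl ?_
  intro d hd
  have hd0 : d ≠ 0 := by
    rcases Nat.mem_divisors.mp hd with ⟨hdvd, hj0⟩
    rintro rfl; exact hj0 (Nat.eq_zero_of_zero_dvd hdvd)
  simp [baseAF, hd0]

-- a 'for d in range(1, B): if m % d == 0: s += f d' loop is a divisor sum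
lemma foldl_dvd_sum (f : Int → Int) (m : ℕ) (B : ℕ) (init : Int) :
    (PySem.List.pyRange 1 (B : Int) 1).foldl
        (fun s d => if PySem.Int.mod (m : Int) d = 0 then s + f d else s) init
      = init + ∑ d ∈ Finset.Ico 1 B, (if d ∣ m then f (d : Int) else 0) := by
  induction B with
  | zero => simp [PySem.List.pyRange_one_eq_nil]
  | succ B ih =>
    rcases Nat.eq_zero_or_pos B with rfl | hB
    · simp [PySem.List.pyRange_one_eq_nil]
    · have hc : ((B : Int) + 1) = ((B + 1 : ℕ) : Int) := by push_cast; ring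
      rw [← hc, PySem.List.pyRange_one_succ_right (by exact_mod_cast hB), List.foldl_append, ih]
      simp only [List.foldl_cons, List.foldl_nil]
      rw [Finset.sum_Ico_succ_top hB]
      have hdvd : (PySem.Int.mod (m : Int) (B : Int) = 0) ↔ (B ∣ m) := by
        rw [PySem.Int.mod_eq_zero_iff_dvd]; exact Int.natCast_dvd_natCast
      split_ifs with h1 h2 h2
      · ring
      · exact absurd (hdvd.mp h1) h2
      · exact absurd (hdvd.mpr h2) h1
      · ring

lemma getD_set_self (l : List Int) (j : ℕ) (v : Int) (h : j < l.length) :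
    (l.set j v).getD j 0 = v := by
  simp [List.getD, h]

lemma getD_set_ne (l : List Int) (j k : ℕ) (v : Int) (h : j ≠ k) :
    (l.set j v).getD k 0 = l.getD k 0 := by
  simp [List.getD, List.getElem?_set_ne h]

lemma sum_Ico_dvd_eq_properDivisors (m : ℕ) (g : ℕ → ℤ) :
    ∑ d ∈ Finset.Ico 1 m, (if d ∣ m then g d else 0) = ∑ d ∈ m.properDivisors, g d := by
  rw [show m.properDivisors = Finset.filter (· ∣ m) (Finset.Ico 1 m) from rfl, Finset.sum_filter]

lemma sum_Ico_dvd_eq_divisors (m : ℕ) (g : ℕ → ℤ) :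
    ∑ d ∈ Finset.Ico 1 (m + 1), (if d ∣ m then g d else 0) = ∑ d ∈ m.divisors, g d := by
  rw [show m.divisors = Finset.filter (· ∣ m) (Finset.Ico 1 (m + 1)) from rfl, Finset.sum_filter]

lemma sum_properDivisors_moebius (m : ℕ) (hm : m ≠ 0) :
    ∑ d ∈ m.properDivisors, (ArithmeticFunction.moebius d : ℤ)
      = (if m = 1 then 1 else 0) - ArithmeticFunction.moebius m := by
  have h := sum_divisors_moebius m
  rw [← Nat.cons_self_properDivisors hm, Finset.sum_cons] at h
  omega

-- Source B's mu_table builds exactly the Möbius values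
def muStep (mu : List Int) (m : Int) : List Int :=
  PySem.List.pySetD mu m ((if m = 1 then 1 else 0) -
    (PySem.List.pyRange 1 m 1).foldl
      (fun s d => if PySem.Int.mod m d = 0 then s + PySem.List.pyGetD mu d 0 else s) 0)

lemma muTable_eq_muStep (n : Int) :
    muTable n = (PySem.List.pyRange 1 (n + 1) 1).foldl muStep (List.replicate (n + 1).toNat 0) := rfl

lemma muTable_aux (n M : ℕ) (hM : M ≤ n) :
    ((PySem.List.pyRange 1 ((M : Int) + 1) 1).foldl muStep (List.replicate (n + 1) 0)).length
        = n + 1 ∧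
    ∀ m : ℕ, ((PySem.List.pyRange 1 ((M : Int) + 1) 1).foldl muStep
          (List.replicate (n + 1) 0)).getD m 0
        = if 1 ≤ m ∧ m ≤ M then ArithmeticFunction.moebius m else 0 := by
  induction M with
  | zero =>
    rw [show ((0:ℕ):Int) + 1 = 1 by norm_num, PySem.List.pyRange_one_eq_nil le_rfl]
    refine ⟨by simp, ?_⟩
    intro m
    rw [if_neg (by omega)]
    simp only [List.foldl_nil, List.getD, List.getElem?_replicate]
    split <;> rfl
  | succ M ih =>
    obtain ⟨ihlen, ihget⟩ := ih (by omega)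
    have hc : ((M + 1 : ℕ) : Int) + 1 = ((M : Int) + 1) + 1 := by push_cast; ring
    have hpeel : PySem.List.pyRange 1 (((M + 1 : ℕ) : Int) + 1) 1
        = PySem.List.pyRange 1 ((M : Int) + 1) 1 ++ [(M : Int) + 1] := by
      rw [hc, PySem.List.pyRange_one_succ_right (by omega)]
    rw [hpeel, List.foldl_append]
    set t : List Int := (PySem.List.pyRange 1 ((M : Int) + 1) 1).foldl muStep
      (List.replicate (n + 1) 0) with ht
    simp only [List.foldl_cons, List.foldl_nil]
    have hM1 : ((M : Int) + 1) = ((M + 1 : ℕ) : Int) := by push_cast; ring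
    have hs : (PySem.List.pyRange 1 ((M : Int) + 1) 1).foldl
        (fun s d => if PySem.Int.mod ((M : Int) + 1) d = 0 then s + PySem.List.pyGetD t d 0 else s) 0
        = ((if M + 1 = 1 then 1 else 0) - ArithmeticFunction.moebius (M + 1) : ℤ) := by
      rw [hM1, foldl_dvd_sum (fun d => PySem.List.pyGetD t d 0) (M + 1) (M + 1) 0]
      rw [zero_add]
      have hcg : ∀ d ∈ Finset.Ico 1 (M + 1),
          (if d ∣ (M + 1) then PySem.List.pyGetD t (d : Int) 0 else 0)
            = (if d ∣ (M + 1) then (ArithmeticFunction.moebius d : ℤ) else 0) := by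
        intro d hd
        rcases Finset.mem_Ico.mp hd with ⟨hd1, hd2⟩
        by_cases hdvd : d ∣ (M + 1)
        · rw [if_pos hdvd, if_pos hdvd, PySem.List.pyGetD_natCast, ihget d, if_pos ⟨hd1, by omega⟩]
        · rw [if_neg hdvd, if_neg hdvd]
      rw [Finset.sum_congr rfl hcg, sum_Ico_dvd_eq_properDivisors,
        sum_properDivisors_moebius (M + 1) (by omega)]
    rw [muStep, hs]
    have hset : PySem.List.pySetD t ((M : Int) + 1)
          ((if ((M : Int) + 1) = 1 then 1 else 0) -
            ((if M + 1 = 1 then 1 else 0) - ArithmeticFunction.moebius (M + 1) : ℤ))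
        = t.set (M + 1) (ArithmeticFunction.moebius (M + 1)) := by
      rw [hM1, PySem.List.pySetD_natCast]
      congr 1
      rw [if_congr (show (((M + 1 : ℕ) : Int) = 1) ↔ (M + 1 = 1) by omega) rfl rfl]
      ring
    rw [hset]
    refine ⟨by rw [List.length_set, ihlen], ?_⟩
    intro m
    by_cases hm : m = M + 1
    · subst hm
      rw [getD_set_self _ _ _ (by omega), if_pos ⟨by omega, le_refl _⟩]
    · rw [getD_set_ne _ _ _ _ (fun h => hm h.symm), ihget m]
      by_cases h1 : 1 ≤ m ∧ m ≤ M
      · rw [if_pos h1, if_pos ⟨h1.1, by omega⟩]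
      · rw [if_neg h1, if_neg (by omega)]

lemma muTable_getD (n m : ℕ) (h1 : 1 ≤ m) (h2 : m ≤ n) :
    (muTable (n : Int)).getD m 0 = ArithmeticFunction.moebius m := by
  rw [muTable_eq_muStep]
  have h := (muTable_aux n n le_rfl).2 m
  rw [if_pos ⟨h1, h2⟩] at h
  simpa using h

lemma bitLoop_len_nonneg (w : Int) (a : List Int) (l : Int) (hl : 0 ≤ l) :
    0 ≤ (bitLoop w a l).2 := by
  induction w, a, l using bitLoop.induct with
  | case1 w a l h ih => rw [bitLoop, if_pos h]; exact ih (by omega)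
  | case2 w a l h => rw [bitLoop, if_neg h]; exact hl

lemma bitLoop_len_le (n : ℕ) (w : Int) (a : List Int) (l : Int) (hw : w < 2 ^ n) :
    (bitLoop w a l).2 ≤ l + n := by
  induction n generalizing w a l with
  | zero => rw [bitLoop, if_neg (by omega)]; simp
  | succ n ih =>
    by_cases h : 0 < w
    · rw [bitLoop, if_pos h]
      have h2 : PySem.Int.floordiv w 2 < 2 ^ n := by
        rw [PySem.Int.floordiv_eq_ediv_of_pos (by omega)]
        have : (2:Int) ^ (n+1) = 2 * 2 ^ n := by ring
        omega
      have := ih (PySem.Int.floordiv w 2) (a ++ [PySem.Int.mod w 2]) (l + 1) h2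
      omega
    · rw [bitLoop, if_neg h]; simp; omega

-- A's k-loop subtracts the already-stored values at the proper divisors of j
lemma kLoop_eq (j : ℕ) (hj100 : j < 100) (dp : List Int) (hlen : dp.length = 100)
    (v : Int) (B : ℕ) (hB : B ≤ j) :
    (PySem.List.pyRange 1 (B : Int) 1).foldl (dpKStep (j : Int)) (dp.set j v)
      = dp.set j (v - ∑ k ∈ Finset.Ico 1 B, (if k ∣ j then dp.getD k 0 else 0)) := by
  induction B generalizing v with
  | zero => simp [PySem.List.pyRange_one_eq_nil]
  | succ B ih =>
    rcases Nat.eq_zero_or_pos B with rfl | hB1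
    · simp [PySem.List.pyRange_one_eq_nil]
    · have hc : ((B : Int) + 1) = ((B + 1 : ℕ) : Int) := by push_cast; ring
      rw [← hc, PySem.List.pyRange_one_succ_right (by exact_mod_cast hB1), List.foldl_append,
        ih v (Nat.le_of_succ_le hB)]
      simp only [List.foldl_cons, List.foldl_nil]
      rw [Finset.sum_Ico_succ_top hB1]
      have hBj : B ≠ j := by omega
      have hdvd : (PySem.Int.mod (j : Int) (B : Int) = 0) ↔ (B ∣ j) := by
        rw [PySem.Int.mod_eq_zero_iff_dvd]; exact Int.natCast_dvd_natCast
      by_cases h : B ∣ j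
      · rw [dpKStep, if_pos (hdvd.mpr h)]
        rw [PySem.List.pySetD_natCast, PySem.List.pyGetD_natCast, PySem.List.pyGetD_natCast]
        rw [getD_set_self _ _ _ (by omega), getD_set_ne dp j B _ hBj.symm, List.set_set]
        rw [if_pos h]
        ring_nf
      · rw [dpKStep, if_neg (fun hc2 => h (hdvd.mp hc2)), if_neg h]
        ring_nf

-- A's j-loop invariant: ans accumulates F over the divisors of i processed so far,
-- and dp stores F at exactly those divisors
lemma jLoop_eq (len_ ww : Int) (a : List Int) (i : ℕ) (hi : 2 ≤ i)
    (J : ℕ) (hJ : J ≤ i / 2) (h100 : i / 2 < 100) (ans : Int) :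
    ∃ dpf : List Int,
      (PySem.List.pyRange 1 ((J : Int) + 1) 1).foldl (dpJStep len_ ww a (i : Int))
          (ans, List.replicate 100 0)
        = (ans + ∑ j ∈ Finset.Ico 1 (J + 1),
            (if j ∣ i then exactF len_ ww a (i : Int) j else 0), dpf) ∧
      dpf.length = 100 ∧
      ∀ m : ℕ, dpf.getD m 0
        = if 1 ≤ m ∧ m ≤ J ∧ m ∣ i then exactF len_ ww a (i : Int) m else 0 := by
  induction J with
  | zero =>
    refine ⟨List.replicate 100 0, ?_, by simp, ?_⟩
    · rw [show ((0:ℕ):Int) + 1 = 1 by norm_num, PySem.List.pyRange_one_eq_nil le_rfl]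
      simp
    · intro m
      rw [if_neg (by omega)]
      simp only [List.getD, List.getElem?_replicate]
      split <;> rfl
  | succ J ih =>
    obtain ⟨dpf, hfold, hlen, hget⟩ := ih (by omega)
    have hc : ((J : Int) + 1) + 1 = ((J + 1 : ℕ) : Int) + 1 := by push_cast; ring
    have hpeel : PySem.List.pyRange 1 (((J + 1 : ℕ) : Int) + 1) 1
        = PySem.List.pyRange 1 ((J : Int) + 1) 1 ++ [((J + 1 : ℕ) : Int)] := by
      rw [← hc, PySem.List.pyRange_one_succ_right (by omega)]
      norm_num
    rw [hpeel, List.foldl_append, hfold]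
    simp only [List.foldl_cons, List.foldl_nil]
    have hdvd : (PySem.Int.mod (i : Int) ((J + 1 : ℕ) : Int) = 0) ↔ ((J + 1) ∣ i) := by
      rw [PySem.Int.mod_eq_zero_iff_dvd]; exact Int.natCast_dvd_natCast
    by_cases hd : (J + 1) ∣ i
    · -- the divisor branch
      simp only [dpJStep, hdvd.mpr hd, ne_eq, not_true_eq_false, if_false]
      have hJ1 : J + 1 < 100 := by omega
      have hget0 : PySem.List.pyGetD dpf ((J + 1 : ℕ) : Int) 0 = 0 := by
        rw [PySem.List.pyGetD_natCast, hget (J + 1), if_neg (by omega)]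
      have hbase : (if ((i:Int)) < len_ then (2:Int) ^ ((((J + 1 : ℕ) : Int)) - 1).toNat
            else cal len_ (((J + 1 : ℕ) : Int)) ww a)
          = baseG len_ ww a (i : Int) (J + 1) := by
        rw [baseG]
        congr 2
        omega
      rw [PySem.List.pySetD_natCast, hget0, zero_add, hbase]
      rw [kLoop_eq (J + 1) hJ1 dpf hlen _ (J + 1) le_rfl]
      have hsub : ∑ k ∈ Finset.Ico 1 (J + 1), (if k ∣ (J + 1) then dpf.getD k 0 else 0)
          = ∑ k ∈ (J + 1).properDivisors, exactF len_ ww a (i : Int) k := by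
        rw [← sum_Ico_dvd_eq_properDivisors]
        refine Finset.sum_congr rfl ?_
        intro k hk
        rcases Finset.mem_Ico.mp hk with ⟨hk1, hk2⟩
        by_cases hkd : k ∣ (J + 1)
        · rw [if_pos hkd, if_pos hkd, hget k,
            if_pos ⟨hk1, by omega, dvd_trans hkd hd⟩]
        · rw [if_neg hkd, if_neg hkd]
      rw [hsub, ← exactF_recurrence len_ ww a (i : Int) (J + 1) (by omega)]
      refine ⟨dpf.set (J + 1) (exactF len_ ww a (i : Int) (J + 1)), ?_, ?_, ?_⟩
      · have : PySem.List.pyGetD (dpf.set (J + 1) (exactF len_ ww a (i : Int) (J + 1)))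
            ((J + 1 : ℕ) : Int) 0 = exactF len_ ww a (i : Int) (J + 1) := by
          rw [PySem.List.pyGetD_natCast, getD_set_self _ _ _ (by omega)]
        rw [this]
        conv_rhs => rw [Finset.sum_Ico_succ_top (by omega : 1 ≤ J + 1), if_pos hd]
        rw [add_assoc]
      · rw [List.length_set, hlen]
      · intro m
        by_cases hm : m = J + 1
        · subst hm
          rw [getD_set_self _ _ _ (by omega), if_pos ⟨by omega, le_refl _, hd⟩]
        · rw [getD_set_ne _ _ _ _ (fun h => hm h.symm), hget m]
          by_cases h1 : 1 ≤ m ∧ m ≤ J ∧ m ∣ i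
          · rw [if_pos h1, if_pos ⟨h1.1, by omega, h1.2.2⟩]
          · rw [if_neg h1, if_neg (by omega)]
    · -- not a divisor: nothing happens
      rw [dpJStep, if_pos (show PySem.Int.mod (i:Int) ((J+1:ℕ):Int) ≠ 0
        from fun hc2 => hd (hdvd.mp hc2))]
      refine ⟨dpf, ?_, hlen, ?_⟩
      · conv_rhs => rw [Finset.sum_Ico_succ_top (by omega : 1 ≤ J + 1), if_neg hd]
        rw [add_zero]
      · intro m
        rw [hget m]
        by_cases h1 : 1 ≤ m ∧ m ≤ J ∧ m ∣ i
        · rw [if_pos h1, if_pos ⟨h1.1, by omega, h1.2.2⟩]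
        · rw [if_neg h1]
          by_cases hm : m = J + 1
          · subst hm; rw [if_neg (fun h => hd h.2.2)]
          · rw [if_neg (fun h => h1 ⟨h.1, by omega, h.2.2⟩)]

-- B's j-loop: the same divisor sum, via the Möbius table
lemma altJLoop_eq (len_ ww : Int) (a : List Int) (n : ℕ) (i : ℕ)
    (J : ℕ) (hJ : J ≤ i / 2) (hn : i / 2 ≤ n) (ans : Int) :
    (PySem.List.pyRange 1 ((J : Int) + 1) 1).foldl
        (altJStep len_ ww a (muTable (n : Int)) (i : Int)) ans
      = ans + ∑ j ∈ Finset.Ico 1 (J + 1),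
          (if j ∣ i then exactF len_ ww a (i : Int) j else 0) := by
  induction J generalizing ans with
  | zero =>
    rw [show ((0:ℕ):Int) + 1 = 1 by norm_num, PySem.List.pyRange_one_eq_nil le_rfl]
    simp
  | succ J ih =>
    have hc : ((J : Int) + 1) + 1 = ((J + 1 : ℕ) : Int) + 1 := by push_cast; ring
    have hpeel : PySem.List.pyRange 1 (((J + 1 : ℕ) : Int) + 1) 1
        = PySem.List.pyRange 1 ((J : Int) + 1) 1 ++ [((J + 1 : ℕ) : Int)] := by
      rw [← hc, PySem.List.pyRange_one_succ_right (by omega)]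
      norm_num
    rw [hpeel, List.foldl_append, ih (by omega)]
    simp only [List.foldl_cons, List.foldl_nil]
    have hdvd : (PySem.Int.mod (i : Int) ((J + 1 : ℕ) : Int) = 0) ↔ ((J + 1) ∣ i) := by
      rw [PySem.Int.mod_eq_zero_iff_dvd]; exact Int.natCast_dvd_natCast
    by_cases hd : (J + 1) ∣ i
    · rw [altJStep, if_neg (not_not_intro (hdvd.mpr hd))]
      have hstep : altDStep len_ ww a (muTable (n : Int)) (i : Int) ((J + 1 : ℕ) : Int)
          = fun s d => if PySem.Int.mod ((J + 1 : ℕ) : Int) d = 0 then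
              s + PySem.List.pyGetD (muTable (n : Int)) (PySem.Int.floordiv ((J + 1 : ℕ) : Int) d) 0 *
                (if (i : Int) < len_ then 2 ^ (d - 1).toNat else cal len_ d ww a)
              else s := rfl
      have hup : (((J + 1 : ℕ) : Int) + 1) = (((J + 2 : ℕ)) : Int) := by push_cast; ring
      rw [hstep, hup, foldl_dvd_sum _ (J + 1) (J + 2)]
      have hcg : ∀ d ∈ Finset.Ico 1 (J + 2),
          (if d ∣ (J + 1) then
              PySem.List.pyGetD (muTable (n : Int)) (PySem.Int.floordiv ((J + 1 : ℕ) : Int) (d : ℕ)) 0 *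
                (if (i : Int) < len_ then 2 ^ (((d : ℕ) : Int) - 1).toNat else cal len_ ((d : ℕ) : Int) ww a)
            else 0)
          = (if d ∣ (J + 1) then
              (ArithmeticFunction.moebius ((J + 1) / d) : ℤ) * baseG len_ ww a (i : Int) d else 0) := by
        intro d hd2
        rcases Finset.mem_Ico.mp hd2 with ⟨hd1, hd3⟩
        by_cases hdd : d ∣ (J + 1)
        · rw [if_pos hdd, if_pos hdd]
          have hfd : PySem.Int.floordiv ((J + 1 : ℕ) : Int) ((d : ℕ) : Int)
              = (((J + 1) / d : ℕ) : Int) := PySem.Int.floordiv_natCast _ _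
          have hq1 : 1 ≤ (J + 1) / d := Nat.one_le_div_iff (by omega) |>.mpr (by omega)
          have hq2 : (J + 1) / d ≤ n := le_trans (Nat.div_le_self _ _) (by omega)
          rw [hfd, PySem.List.pyGetD_natCast, muTable_getD n ((J + 1) / d) hq1 hq2]
          have hbase : (if (i : Int) < len_ then (2:Int) ^ (((d : ℕ) : Int) - 1).toNat
                else cal len_ ((d : ℕ) : Int) ww a)
              = baseG len_ ww a (i : Int) d := by
            rw [baseG]
            congr 2
            omega
          rw [hbase]
        · rw [if_neg hdd, if_neg hdd]
      rw [Finset.sum_congr rfl hcg]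
      rw [show Finset.Ico 1 (J + 2) = Finset.Ico 1 ((J + 1) + 1) from rfl,
        sum_Ico_dvd_eq_divisors (J + 1)
          (fun d => (ArithmeticFunction.moebius ((J + 1) / d) : ℤ) * baseG len_ ww a (i : Int) d),
        ← exactF_moebius_sum]
      conv_rhs => rw [Finset.sum_Ico_succ_top (by omega : 1 ≤ J + 1), if_pos hd]
      rw [add_assoc]
    · rw [altJStep, if_pos (show PySem.Int.mod (i:Int) ((J+1:ℕ):Int) ≠ 0
        from fun hc2 => hd (hdvd.mp hc2))]
      conv_rhs => rw [Finset.sum_Ico_succ_top (by omega : 1 ≤ J + 1), if_neg hd]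
      rw [add_zero]

theorem main_eq (w : Int) (hw : 0 ≤ w) (hbound : w ≤ 2147483648) : solve w = solve_alt w := by
  simp only [solve, solve_alt]
  have hL0 : 0 ≤ (bitLoop w [] 0).2 := bitLoop_len_nonneg w [] 0 le_rfl
  have hL32 : (bitLoop w [] 0).2 ≤ 32 := by
    have h2 : (2:Int) ^ 32 = 4294967296 := by norm_num
    have := bitLoop_len_le 32 w [] 0 (by omega)
    omega
  set p := bitLoop w [] 0 with hp
  set L : ℕ := p.2.toNat with hLdef
  have hL : p.2 = (L : Int) := by omega
  apply PySem.List.foldl_congr_mem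
  intro ans i hi
  rcases (PySem.List.mem_pyRange_one).mp hi with ⟨hi2, hi3⟩
  set iN : ℕ := i.toNat with hiNdef
  have hiN : i = (iN : Int) := by omega
  have hiL : iN ≤ L := by omega
  have hi2N : 2 ≤ iN := by omega
  have h100 : iN / 2 < 100 := by omega
  have hfi : PySem.Int.floordiv ((iN : ℕ) : Int) 2 = ((iN / 2 : ℕ) : Int) := by
    exact_mod_cast PySem.Int.floordiv_natCast iN 2
  rw [hiN, hfi]
  obtain ⟨dpf, hfold, -, -⟩ := jLoop_eq p.2 w p.1 iN hi2N (iN / 2) le_rfl h100 ans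
  rw [hfold]
  have hfL : PySem.Int.floordiv ((L : ℕ) : Int) 2 = ((L / 2 : ℕ) : Int) := by
    exact_mod_cast PySem.Int.floordiv_natCast L 2
  rw [hL, hfL]
  rw [altJLoop_eq ((L : ℕ) : Int) w p.1 (L / 2) iN (iN / 2) le_rfl (Nat.div_le_div_right hiL) ans]

-- ===== VERDICT (by name: the statement is the Claim_ definition above) =====
theorem solve_spec : Claim_equal_solve := by
  intro w hdom hpre
  unfold Spec_solve
  have hb : w ≤ 2147483648 := by
    have := of_decide_eq_true hdom
    omega
  exact main_eq w hpre hb
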